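-- pv_equiv track=rewrite | github.com/BrettRey/erdos-problem-993 | conjecture_a_singleton_dominance_scan.py | decode_subset
-- ===== SOURCE A (Python) =====
-- def decode_subset(mask: int, h_nodes: list[int]) -> list[int]:
--     out: list[int] = []
--     rem = mask
--     while rem:
--         lsb = rem & -rem
--         i = lsb.bit_length() - 1
--         rem ^= lsb
--         out.append(h_nodes[i])
--     return out
-- ===== SOURCE B (Python) =====
-- def decode_subset(mask: int, h_nodes: list[int]) -> list[int]:
--     return [h_nodes[i] for i in range(mask.bit_length()) if mask >> i & 1]
-- ===== Notes on version B (the rewrite author's own statement) =====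
-- stated objective: idiomatic
-- what changed: replaces the destructive lowest-set-bit extraction loop (rem & -rem, xor, append) with a single comprehension scanning every bit position of the mask in order
import Mathlib
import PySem

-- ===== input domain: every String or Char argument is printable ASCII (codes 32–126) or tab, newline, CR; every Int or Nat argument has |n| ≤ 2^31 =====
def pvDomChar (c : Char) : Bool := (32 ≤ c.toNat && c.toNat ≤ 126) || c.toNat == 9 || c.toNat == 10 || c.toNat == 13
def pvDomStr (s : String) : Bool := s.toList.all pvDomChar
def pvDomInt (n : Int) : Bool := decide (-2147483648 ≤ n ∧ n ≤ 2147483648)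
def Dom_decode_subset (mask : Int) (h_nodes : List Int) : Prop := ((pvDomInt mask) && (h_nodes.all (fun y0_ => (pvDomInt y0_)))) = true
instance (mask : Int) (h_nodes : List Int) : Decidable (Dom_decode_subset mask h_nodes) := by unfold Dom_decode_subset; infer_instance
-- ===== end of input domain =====

-- B rewrites A's destructive lowest-set-bit extraction loop as a comprehension scanning
-- every bit position of the mask in increasing order (idiomatic; no speed claim).

-- ===== PORT A =====
-- the while loop of A, on rem = mask (a Nat: Pre_ requires mask ≥ 0; on a negative
-- mask the Python loops forever, so those inputs are outside Pre_).
-- `rem - (rem &&& (rem - 1))` is Python's `rem & -rem` (the lowest set bit), exact for rem > 0;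
-- `.size - 1` is `.bit_length() - 1`; h_nodes[i] is in range on Pre_, so getD 0 is never taken there.
def pvLoopA (h_nodes : List Int) (fuel : Nat) (rem : Nat) (out : List Int) : List Int :=
  match fuel with
  | 0 => out  -- fuel exhausted: unreachable, the caller passes fuel = rem and rem strictly decreases
  | fuel + 1 =>
    if rem = 0 then out
    else
      let lsb := rem - (rem &&& (rem - 1))
      let i := lsb.size - 1
      pvLoopA h_nodes fuel (rem ^^^ lsb) (out ++ [(PySem.List.pyGet? h_nodes (Int.ofNat i)).getD 0])

def decode_subset (mask : Int) (h_nodes : List Int) : List Int :=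
  pvLoopA h_nodes mask.toNat mask.toNat []

-- ===== PORT B =====
-- [h_nodes[i] for i in range(mask.bit_length()) if mask >> i & 1]
-- bit_length / >> ported on mask.toNat (exact for mask ≥ 0, i.e. on Pre_).
def decode_subset_alt (mask : Int) (h_nodes : List Int) : List Int :=
  (List.range (Nat.size mask.toNat)).filterMap (fun i =>
    if (mask.toNat >>> i) &&& 1 = 1 then
      some ((PySem.List.pyGet? h_nodes (Int.ofNat i)).getD 0)
    else none)

-- ===== PRECONDITION & SPEC =====
-- Pre_ = exactly the inputs on which the Python A returns: a negative mask makes A's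
-- while loop run forever, and a set bit at position ≥ len(h_nodes) raises IndexError.
def Pre_decode_subset (mask : Int) (h_nodes : List Int) : Prop :=
  0 ≤ mask ∧ mask < 2 ^ h_nodes.length
instance (mask : Int) (h_nodes : List Int) : Decidable (Pre_decode_subset mask h_nodes) := by
  unfold Pre_decode_subset; infer_instance

def pvWitness_decode_subset : Int × List Int := (5, [10, 20, 30])

def Spec_decode_subset (mask : Int) (h_nodes : List Int) (out : List Int) : Prop :=
  out = decode_subset_alt mask h_nodes
instance (mask : Int) (h_nodes : List Int) (out : List Int) : Decidable (Spec_decode_subset mask h_nodes out) := by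
  unfold Spec_decode_subset; infer_instance

-- ===== CLAIM (what is proved, stated in full; the proofs are below) =====
def Claim_equal_decode_subset : Prop := ∀ (mask : Int) (h_nodes : List Int), Dom_decode_subset mask h_nodes → Pre_decode_subset mask h_nodes → Spec_decode_subset mask h_nodes (decode_subset mask h_nodes)

-- ===== LEMMAS AND PROOFS =====

-- For n > 0 write n = 2^(t+1)*q + 2^t (t = index of the lowest set bit); then
-- n & (n-1) clears that bit and n ^^^ 2^t equals n - 2^t.
theorem pv_key (n : Nat) (hn : n ≠ 0) :
    ∃ t q, n = 2 ^ (t + 1) * q + 2 ^ t ∧ n &&& (n - 1) = 2 ^ (t + 1) * q ∧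
      n ^^^ 2 ^ t = 2 ^ (t + 1) * q := by
  induction n using Nat.strong_induction_on with
  | _ n ih =>
    rcases Nat.even_or_odd n with he | ho
    · -- n even: n = 2*k, recurse on k
      obtain ⟨k, hk⟩ := he
      have hk2 : n = 2 * k := by omega
      have hkne : k ≠ 0 := by omega
      obtain ⟨t, q, h1, h2, h3⟩ := ih k (by omega) hkne
      have hbf : ∀ m : Nat, 2 * m = Nat.bit false m := by intro m; simp
      refine ⟨t + 1, q, by rw [hk2, h1]; ring, ?_, ?_⟩
      · -- (2*k) &&& (2*k - 1) = 2*(k &&& (k-1))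
        rw [hk2]
        have hb2 : 2 * k - 1 = Nat.bit true (k - 1) := by simp; omega
        rw [hb2, hbf k, Nat.land_bit]
        simp only [Bool.false_and, ← hbf]
        rw [h2]; ring
      · -- (2*k) ^^^ 2^(t+1) = 2*(k ^^^ 2^t)
        rw [hk2]
        have hp : (2:Nat) ^ (t + 1) = Nat.bit false (2 ^ t) := by
          rw [← hbf]; ring
        rw [hp, hbf k, Nat.xor_bit]
        simp only [bne_self_eq_false, ← hbf]
        rw [h3]; ring
    · -- n odd: n = 2*k + 1, t = 0, q = k
      obtain ⟨k, hk⟩ := ho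
      have hbf : ∀ m : Nat, 2 * m = Nat.bit false m := by intro m; simp
      have hbt : 2 * k + 1 = Nat.bit true k := by simp
      refine ⟨0, k, by omega, ?_, ?_⟩
      · -- (2*k+1) &&& (2*k) = 2*k
        rw [hk]
        have hs : 2 * k + 1 - 1 = Nat.bit false k := by rw [← hbf]; omega
        rw [hs, hbt, Nat.land_bit]
        have hself : k &&& k = k := by
          apply Nat.eq_of_testBit_eq; intro i; simp
        simp only [Bool.true_and, hself, ← hbf]
        ring
      · -- (2*k+1) ^^^ 1 = 2*k
        rw [hk]
        have hrhs : (2:Nat) ^ (0 + 1) * k = 2 * k := by ring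
        rw [hrhs, pow_zero, hbt]
        conv_lhs => rw [show (1:Nat) = Nat.bit true 0 from by simp]
        rw [Nat.xor_bit]
        simp only [bne_self_eq_false, Nat.xor_zero, ← hbf]


-- B's per-index body, phrased with testBit
def pvF (n : Nat) (h_nodes : List Int) (i : Nat) : Option Int :=
  if n.testBit i then some ((PySem.List.pyGet? h_nodes (Int.ofNat i)).getD 0) else none

def pvBits (n : Nat) (h_nodes : List Int) : List Int :=
  (List.range n.size).filterMap (pvF n h_nodes)

theorem pv_cond_eq (n i : Nat) : ((n >>> i) &&& 1 = 1) ↔ n.testBit i = true := by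
  have h1 : (n >>> i).testBit 0 = n.testBit i := by simp
  rw [← h1, Nat.testBit_zero, Nat.and_one_is_mod]
  exact (decide_eq_true_iff).symm

theorem pv_alt_eq_bits (mask : Int) (h_nodes : List Int) :
    decode_subset_alt mask h_nodes = pvBits mask.toNat h_nodes := by
  unfold decode_subset_alt pvBits
  apply List.filterMap_congr
  intro i _
  unfold pvF
  by_cases hb : mask.toNat.testBit i
  · rw [if_pos hb, if_pos ((pv_cond_eq _ _).mpr hb)]
  · rw [if_neg hb, if_neg (fun hc => hb ((pv_cond_eq _ _).mp hc))]

-- filtering over any range at least n.size long gives pvBits (higher bits are 0)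
theorem pv_bits_ext (n : Nat) (h_nodes : List Int) :
    ∀ K, n.size ≤ K → (List.range K).filterMap (pvF n h_nodes) = pvBits n h_nodes := by
  intro K
  induction K with
  | zero =>
    intro hK
    have hs : n.size = 0 := by omega
    unfold pvBits; rw [hs]
  | succ K ih =>
    intro hK
    by_cases h : n.size ≤ K
    · rw [List.range_succ, List.filterMap_append, ih h]
      have hfalse : n.testBit K = false :=
        Nat.testBit_eq_false_of_lt (Nat.size_le.mp h)
      simp [pvF, hfalse]
    · have hs : n.size = K + 1 := by omega
      unfold pvBits; rw [hs]

-- one step of A's loop on the B side: pulling out the lowest set bit t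
theorem pv_bits_step (t q : Nat) (h_nodes : List Int) :
    pvBits (2 ^ (t + 1) * q + 2 ^ t) h_nodes =
      (PySem.List.pyGet? h_nodes (Int.ofNat t)).getD 0 :: pvBits (2 ^ (t + 1) * q) h_nodes := by
  set n := 2 ^ (t + 1) * q + 2 ^ t with hn
  set n' := 2 ^ (t + 1) * q with hn'
  have hpow : (2:Nat) ^ (t + 1) = 2 * 2 ^ t := by ring
  have hshl : n = (2 * q + 1) <<< t := by
    rw [Nat.shiftLeft_eq]; rw [hn]; ring
  have hshl' : n' = (2 * q) <<< t := by
    rw [Nat.shiftLeft_eq]; rw [hn']; ring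
  -- bit facts
  have f1 : ∀ j, j < t → n.testBit j = false := by
    intro j hj
    rw [hshl, Nat.testBit_shiftLeft]
    simp [Nat.not_le.mpr hj]
  have f2 : n.testBit t = true := by
    rw [hshl, Nat.testBit_shiftLeft]
    simp [Nat.testBit_zero]
  have f3 : ∀ k, n.testBit (t + 1 + k) = n'.testBit (t + 1 + k) := by
    intro k
    rw [hshl, hshl', Nat.testBit_shiftLeft, Nat.testBit_shiftLeft]
    have hge : t + 1 + k ≥ t := by omega
    have hsub : t + 1 + k - t = k + 1 := by omega
    simp only [hge, decide_true, Bool.true_and, hsub, Nat.testBit_succ]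
    have e1 : (2 * q + 1) / 2 = q := by omega
    have e2 : 2 * q / 2 = q := by omega
    rw [e1, e2]
  have f4 : ∀ j, j ≤ t → n'.testBit j = false := by
    intro j hj
    rw [hshl', Nat.testBit_shiftLeft]
    rcases Nat.lt_or_ge j t with h | h
    · simp [Nat.not_le.mpr h]
    · have hjt : j = t := by omega
      subst hjt
      simp [Nat.testBit_zero]
  -- both sides as filters over range K, K = n.size
  have hK : t + 1 ≤ n.size := by
    have h2t : 2 ^ t ≤ n := by rw [hn]; exact Nat.le_add_left _ _
    exact Nat.lt_size.mpr h2t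
  have hle : n' ≤ n := by rw [hn, hn']; exact Nat.le_add_right _ _
  have hK' : n'.size ≤ n.size := Nat.size_le_size hle
  have hsplit : List.range n.size =
      List.range (t + 1) ++ (List.range (n.size - (t + 1))).map (fun x => (t + 1) + x) := by
    have h : n.size = (t + 1) + (n.size - (t + 1)) := (Nat.add_sub_cancel' hK).symm
    conv_lhs => rw [h, List.range_add]
  have head_n : (List.range (t + 1)).filterMap (pvF n h_nodes) =
      [(PySem.List.pyGet? h_nodes (Int.ofNat t)).getD 0] := by
    rw [List.range_succ, List.filterMap_append]
    have hnil : (List.range t).filterMap (pvF n h_nodes) = [] := by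
      rw [List.filterMap_eq_nil_iff]
      intro a ha
      have : a < t := List.mem_range.mp ha
      simp [pvF, f1 a this]
    rw [hnil]
    simp [pvF, f2]
  have head_n' : (List.range (t + 1)).filterMap (pvF n' h_nodes) = [] := by
    rw [List.filterMap_eq_nil_iff]
    intro a ha
    have : a < t + 1 := List.mem_range.mp ha
    simp [pvF, f4 a (by omega)]
  have tail_eq : ((List.range (n.size - (t + 1))).map (fun x => (t + 1) + x)).filterMap (pvF n h_nodes) =
      ((List.range (n.size - (t + 1))).map (fun x => (t + 1) + x)).filterMap (pvF n' h_nodes) := by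
    rw [List.filterMap_map, List.filterMap_map]
    apply List.filterMap_congr
    intro x _
    simp only [Function.comp]
    unfold pvF
    rw [f3 x]
  calc pvBits n h_nodes
      = (List.range n.size).filterMap (pvF n h_nodes) := rfl
    _ = (List.range (t + 1)).filterMap (pvF n h_nodes) ++
          ((List.range (n.size - (t + 1))).map (fun x => (t + 1) + x)).filterMap (pvF n h_nodes) := by
          rw [hsplit, List.filterMap_append]
    _ = [(PySem.List.pyGet? h_nodes (Int.ofNat t)).getD 0] ++
          ((List.range (n.size - (t + 1))).map (fun x => (t + 1) + x)).filterMap (pvF n' h_nodes) := by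
          rw [head_n, tail_eq]
    _ = (PySem.List.pyGet? h_nodes (Int.ofNat t)).getD 0 :: pvBits n' h_nodes := by
          rw [← pv_bits_ext n' h_nodes n.size hK', hsplit, List.filterMap_append, head_n']
          simp

-- A's loop computes out ++ (B's bit scan), given enough fuel
theorem pv_loop_eq_bits (fuel : Nat) : ∀ (rem : Nat) (h_nodes out : List Int), rem ≤ fuel →
    pvLoopA h_nodes fuel rem out = out ++ pvBits rem h_nodes := by
  induction fuel with
  | zero =>
    intro rem h_nodes out hle
    have h0 : rem = 0 := by omega
    subst h0
    simp [pvLoopA, pvBits, Nat.size_zero]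
  | succ fuel ih =>
    intro rem h_nodes out hle
    by_cases hr : rem = 0
    · subst hr
      simp [pvLoopA, pvBits, Nat.size_zero]
    · obtain ⟨t, q, h1, h2, h3⟩ := pv_key rem hr
      have hlsb : rem - (rem &&& (rem - 1)) = 2 ^ t := by
        rw [h2]
        conv_lhs => rw [h1]
        exact Nat.add_sub_cancel_left _ _
      have hi : (2 ^ t : Nat).size - 1 = t := by simp [Nat.size_pow]
      have hlt : 2 ^ (t + 1) * q < rem := by
        conv_rhs => rw [h1]
        exact Nat.lt_add_of_pos_right (Nat.two_pow_pos t)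
      have hfuel : 2 ^ (t + 1) * q ≤ fuel := by omega
      rw [pvLoopA]
      simp only [hr, if_neg, not_false_iff]
      rw [hlsb, hi, h3, ih _ _ _ hfuel]
      conv_rhs => rw [h1, pv_bits_step t q h_nodes]
      simp

-- ===== VERDICT (by name: the statement is the Claim_ definition above) =====
theorem decode_subset_spec : Claim_equal_decode_subset := by
  intro mask h_nodes _ _
  unfold Spec_decode_subset
  rw [pv_alt_eq_bits]
  unfold decode_subset
  rw [pv_loop_eq_bits _ _ _ _ (Nat.le_refl _)]
  simp
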